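-- pv_equiv track=rewrite | github.com/MaxEntGirl/Erweitungsmodul | 6/Symmetrisierung.py | grow_diag_final
-- ===== SOURCE A (Python) =====
-- import itertools
--
-- def grow_diag_final(e2f, f2e):
--     #adds alignments in the neighborhood of alignments in the intersection and union
--     neighbouring = [(-1, 0), (0, -1), (1, 0), (0, 1), (-1, -1), (-1, 1), (1, -1), (1, 1)]
--     alignments = e2f.intersection(f2e)
--     alignment_union = e2f.union(f2e)
--     e_len = max((e for e, f in alignment_union))
--     f_len = max((f for e, f in alignment_union))
--
--     for e, f in itertools.product(range(e_len+1), range(f_len+1)):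
--         if (e, f) in alignments:
--             for e_new, f_new in ((e + E, f + F) for E, F in neighbouring):
--                 if e_new not in {e for e, f in alignments} and f_new not in {f for e, f in alignments} and (e_new, f_new) in alignment_union:
--                     alignments.add((e_new, f_new))
--
--     for e_new, f_new in itertools.product(range(e_len), range(f_len)):
--         if e_new not in {e for e, f in alignments} and f_new not in {f for e, f in alignments} and (e_new, f_new) in alignment_union:
--             alignments.add((e_new, f_new))
--
--     return alignments
-- ===== SOURCE B (Python) =====
-- def grow_diag_final(e2f, f2e):
--     # Sparse sweep: every point A can ever process or add lies in the union of
--     # the two alignment sets, so instead of scanning the whole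
--     # (e_len+1) x (f_len+1) grid we walk the union's points once in
--     # lexicographic (= grid scan) order, for both the grow-diag pass and the
--     # final pass, keeping covered rows/columns in incrementally updated sets.
--     neighbouring = [(-1, 0), (0, -1), (1, 0), (0, 1), (-1, -1), (-1, 1), (1, -1), (1, 1)]
--     union = e2f | f2e
--     e_len = max(e for e, f in union)
--     f_len = max(f for e, f in union)
--     alignments = e2f & f2e
--     rows = {e for e, f in alignments}
--     cols = {f for e, f in alignments}
--     points = sorted(union)
--
--     for e, f in points:
--         if 0 <= e <= e_len and 0 <= f <= f_len and (e, f) in alignments: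
--             for E, F in neighbouring:
--                 q = (e + E, f + F)
--                 if q in union and q[0] not in rows and q[1] not in cols:
--                     alignments.add(q)
--                     rows.add(q[0])
--                     cols.add(q[1])
--
--     for e, f in points:
--         if 0 <= e < e_len and 0 <= f < f_len and e not in rows and f not in cols:
--             alignments.add((e, f))
--             rows.add(e)
--             cols.add(f)
--
--     return alignments
-- ===== Notes on version B (the rewrite author's own statement) =====
-- stated objective: faster
-- what changed: B replaces A's two dense (e_len+1)x(f_len+1) grid sweeps (each rebuilding covered-row/column comprehension sets per check) by a single lexicographically sorted walk over the union's points for both passes -- valid because every cell A can process or add lies in the union -- with incrementally maintained covered-row/column sets.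
import Mathlib
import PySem

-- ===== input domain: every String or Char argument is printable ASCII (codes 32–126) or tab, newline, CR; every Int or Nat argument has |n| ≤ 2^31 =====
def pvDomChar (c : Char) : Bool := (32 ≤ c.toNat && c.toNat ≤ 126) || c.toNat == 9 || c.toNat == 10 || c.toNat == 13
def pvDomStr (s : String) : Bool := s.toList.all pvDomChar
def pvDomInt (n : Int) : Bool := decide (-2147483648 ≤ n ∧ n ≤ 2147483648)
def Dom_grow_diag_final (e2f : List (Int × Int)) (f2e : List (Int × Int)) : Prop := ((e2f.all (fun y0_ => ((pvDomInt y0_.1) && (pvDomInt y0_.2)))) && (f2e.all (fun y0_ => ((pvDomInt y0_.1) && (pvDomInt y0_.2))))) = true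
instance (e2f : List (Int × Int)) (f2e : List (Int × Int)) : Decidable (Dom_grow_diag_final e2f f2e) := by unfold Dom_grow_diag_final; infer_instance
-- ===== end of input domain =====

-- B replaces A's dense (e_len+1)×(f_len+1) grid sweeps by a single sorted walk over
-- the union's points (every processable/addable cell lies in the union), with
-- incrementally maintained covered-row/column sets (objective: faster).

-- ===== PORT A =====
def grow_diag_final (e2f : List (Int × Int)) (f2e : List (Int × Int)) : List (Int × Int) :=
  let neighbouring : List (Int × Int) :=
    [(-1, 0), (0, -1), (1, 0), (0, 1), (-1, -1), (-1, 1), (1, -1), (1, 1)]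
  let alignments0 : PySem.Set (Int × Int) :=
    PySem.Set.inter (PySem.Set.ofList e2f) (PySem.Set.ofList f2e)
  let alignment_union : PySem.Set (Int × Int) :=
    PySem.Set.union (PySem.Set.ofList e2f) (PySem.Set.ofList f2e)
  match PySem.List.max? (alignment_union.map Prod.fst) (fun x => x),
        PySem.List.max? (alignment_union.map Prod.snd) (fun x => x) with
  | some e_len, some f_len =>
    -- first loop: itertools.product(range(e_len+1), range(f_len+1))
    let al1 :=
      ((PySem.List.pyRange 0 (e_len + 1) 1).flatMap (fun e =>
          (PySem.List.pyRange 0 (f_len + 1) 1).map (fun f => (e, f)))).foldl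
        (fun al ef =>
          if ef ∈ al then
            neighbouring.foldl (fun al EF =>
              let e_new := ef.1 + EF.1
              let f_new := ef.2 + EF.2
              if e_new ∉ PySem.Set.ofList (al.map Prod.fst) ∧
                 f_new ∉ PySem.Set.ofList (al.map Prod.snd) ∧
                 (e_new, f_new) ∈ alignment_union
              then PySem.Set.add al (e_new, f_new) else al) al
          else al) alignments0
    -- second loop: itertools.product(range(e_len), range(f_len))
    ((PySem.List.pyRange 0 e_len 1).flatMap (fun e =>
        (PySem.List.pyRange 0 f_len 1).map (fun f => (e, f)))).foldl
      (fun al ef =>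
        if ef.1 ∉ PySem.Set.ofList (al.map Prod.fst) ∧
           ef.2 ∉ PySem.Set.ofList (al.map Prod.snd) ∧
           ef ∈ alignment_union
        then PySem.Set.add al ef else al) al1
  | _, _ => []  -- unreachable under Pre_ (max() over the empty union raises ValueError)

-- ===== PORT B =====
-- B's state: (alignments, covered rows, covered columns); the inner neighbour add
def pvTryAdd (alignment_union : PySem.Set (Int × Int))
    (st : PySem.Set (Int × Int) × PySem.Set Int × PySem.Set Int)
    (q : Int × Int) : PySem.Set (Int × Int) × PySem.Set Int × PySem.Set Int :=
  if q ∈ alignment_union ∧ q.1 ∉ st.2.1 ∧ q.2 ∉ st.2.2 then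
    (PySem.Set.add st.1 q, PySem.Set.add st.2.1 q.1, PySem.Set.add st.2.2 q.2)
  else st

def grow_diag_final_alt (e2f : List (Int × Int)) (f2e : List (Int × Int)) : List (Int × Int) :=
  let neighbouring : List (Int × Int) :=
    [(-1, 0), (0, -1), (1, 0), (0, 1), (-1, -1), (-1, 1), (1, -1), (1, 1)]
  let uni : PySem.Set (Int × Int) :=
    PySem.Set.union (PySem.Set.ofList e2f) (PySem.Set.ofList f2e)
  match PySem.List.max? (uni.map Prod.fst) (fun x => x) with
  | none => []
  | some e_len =>
    match PySem.List.max? (uni.map Prod.snd) (fun x => x) with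
    | none => []
    | some f_len =>
    let alignments0 : PySem.Set (Int × Int) :=
      PySem.Set.inter (PySem.Set.ofList e2f) (PySem.Set.ofList f2e)
    let rows0 : PySem.Set Int := PySem.Set.ofList (alignments0.map Prod.fst)
    let cols0 : PySem.Set Int := PySem.Set.ofList (alignments0.map Prod.snd)
    let points := PySem.List.sorted2 uni Prod.fst Prod.snd
    -- grow-diag pass: sorted sparse sweep over the union's points
    let st1 :=
      points.foldl (fun st p =>
        if 0 ≤ p.1 ∧ p.1 ≤ e_len ∧ 0 ≤ p.2 ∧ p.2 ≤ f_len ∧ p ∈ st.1 then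
          neighbouring.foldl (fun st EF =>
            pvTryAdd uni st (p.1 + EF.1, p.2 + EF.2)) st
        else st) (alignments0, rows0, cols0)
    -- final pass: sorted sparse sweep over the union's points (strict bounds)
    let st2 :=
      points.foldl (fun st p =>
        if 0 ≤ p.1 ∧ p.1 < e_len ∧ 0 ≤ p.2 ∧ p.2 < f_len ∧
           p.1 ∉ st.2.1 ∧ p.2 ∉ st.2.2 then
          (PySem.Set.add st.1 p, PySem.Set.add st.2.1 p.1, PySem.Set.add st.2.2 p.2)
        else st) st1
    st2.1

-- ===== PRECONDITION & SPEC =====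
-- Pre_ excludes only the inputs where both sets are empty: there Python's max() over
-- the empty union raises ValueError in both A and B.
def Pre_grow_diag_final (e2f : List (Int × Int)) (f2e : List (Int × Int)) : Prop :=
  e2f ≠ [] ∨ f2e ≠ []
instance (e2f : List (Int × Int)) (f2e : List (Int × Int)) : Decidable (Pre_grow_diag_final e2f f2e) := by unfold Pre_grow_diag_final; infer_instance

def pvWitness_grow_diag_final : (List (Int × Int)) × (List (Int × Int)) :=
  ([(0, 0), (1, 1)], [(0, 0), (1, 2)])

def Spec_grow_diag_final (e2f : List (Int × Int)) (f2e : List (Int × Int)) (out : List (Int × Int)) : Prop := out = grow_diag_final_alt e2f f2e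
instance (e2f : List (Int × Int)) (f2e : List (Int × Int)) (out : List (Int × Int)) : Decidable (Spec_grow_diag_final e2f f2e out) := by unfold Spec_grow_diag_final; infer_instance

-- ===== CLAIM (what is proved, stated in full; the proofs are below) =====
def Claim_equal_grow_diag_final : Prop := ∀ (e2f : List (Int × Int)) (f2e : List (Int × Int)), Dom_grow_diag_final e2f f2e → Pre_grow_diag_final e2f f2e → Spec_grow_diag_final e2f f2e (grow_diag_final e2f f2e)

-- ===== LEMMAS AND PROOFS =====

-- A's per-cell neighbour/final step: try to add q, recomputing the covered sets
def pvAStep (alignment_union : PySem.Set (Int × Int)) (al : PySem.Set (Int × Int))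
    (q : Int × Int) : PySem.Set (Int × Int) :=
  if q.1 ∉ PySem.Set.ofList (al.map Prod.fst) ∧
     q.2 ∉ PySem.Set.ofList (al.map Prod.snd) ∧
     q ∈ alignment_union
  then PySem.Set.add al q else al

-- the invariant: B's row/column sets are exactly A's recomputed comprehension sets
def pvInv (st : PySem.Set (Int × Int) × PySem.Set Int × PySem.Set Int) : Prop :=
  st.2.1 = PySem.Set.ofList (st.1.map Prod.fst) ∧
  st.2.2 = PySem.Set.ofList (st.1.map Prod.snd)

theorem pvAdd_inv (st : PySem.Set (Int × Int) × PySem.Set Int × PySem.Set Int)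
    (q : Int × Int) (h : pvInv st) (hq1 : q.1 ∉ st.2.1) :
    pvInv (PySem.Set.add st.1 q, PySem.Set.add st.2.1 q.1, PySem.Set.add st.2.2 q.2) := by
  obtain ⟨h1, h2⟩ := h
  rw [h1] at hq1
  have hmem : q ∉ st.1 := fun hm => hq1 ((PySem.Set.mem_ofList _ _).2 (List.mem_map_of_mem hm))
  have hadd : PySem.Set.add st.1 q = st.1 ++ [q] := PySem.Set.add_of_not_mem hmem
  constructor <;> simp [hadd, PySem.Set.ofList_append_singleton, h1, h2]

theorem pvTryAdd_rel (uni : PySem.Set (Int × Int))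
    (st : PySem.Set (Int × Int) × PySem.Set Int × PySem.Set Int) (q : Int × Int)
    (h : pvInv st) :
    pvInv (pvTryAdd uni st q) ∧ (pvTryAdd uni st q).1 = pvAStep uni st.1 q := by
  obtain ⟨h1, h2⟩ := h
  unfold pvTryAdd pvAStep
  rw [← h1, ← h2]
  by_cases hc : q ∈ uni ∧ q.1 ∉ st.2.1 ∧ q.2 ∉ st.2.2
  · rw [if_pos hc, if_pos ⟨hc.2.1, hc.2.2, hc.1⟩]
    exact ⟨pvAdd_inv st q ⟨h1, h2⟩ hc.2.1, rfl⟩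
  · rw [if_neg hc, if_neg (by tauto)]
    exact ⟨⟨h1, h2⟩, rfl⟩

-- generic fold transfer: if each step preserves the invariant and projects to A's step,
-- so does the whole fold
theorem pvFold_rel {α : Type}
    (g : (PySem.Set (Int × Int) × PySem.Set Int × PySem.Set Int) → α →
         (PySem.Set (Int × Int) × PySem.Set Int × PySem.Set Int))
    (gA : PySem.Set (Int × Int) → α → PySem.Set (Int × Int))
    (hstep : ∀ st x, pvInv st → pvInv (g st x) ∧ (g st x).1 = gA st.1 x)
    (l : List α) :
    ∀ st, pvInv st → pvInv (l.foldl g st) ∧ (l.foldl g st).1 = l.foldl gA st.1 := by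
  induction l with
  | nil => exact fun st h => ⟨h, rfl⟩
  | cons x xs ih =>
    intro st h
    obtain ⟨h1, h2⟩ := hstep st x h
    obtain ⟨h3, h4⟩ := ih (g st x) h1
    exact ⟨h3, by simpa [h2] using h4⟩

-- restricting a fold to the elements that can matter, under an invariant
theorem pvFoldl_filter_of_inv {α σ : Type} (P : α → Bool) (inv : σ → Prop)
    (g : σ → α → σ)
    (hpres : ∀ s x, inv s → inv (g s x))
    (hid : ∀ s x, inv s → P x = false → g s x = s) :
    ∀ (l : List α) (s : σ), inv s → l.foldl g s = (l.filter P).foldl g s := by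
  intro l
  induction l with
  | nil => intro s _; rfl
  | cons x xs ih =>
    intro s hs
    by_cases hx : P x = true
    · simp only [List.foldl_cons, List.filter_cons, hx, if_pos]
      exact ih (g s x) (hpres s x hs)
    · have hx' : P x = false := by simpa using hx
      simp only [List.foldl_cons, List.filter_cons, hx']
      rw [hid s x hs hx']
      exact ih s hs
  -- note: `List.filter_cons` gives an `if` on `P x`; handled by the two cases

-- Python's tuple sort is the lexicographic sort
theorem pvSorted2_eq (xs : List (Int × Int)) :
    PySem.List.sorted2 xs Prod.fst Prod.snd =
    PySem.List.sorted xs (fun p => toLex p) := by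
  show xs.foldl (fun acc x => PySem.List.insertBy
      (fun a b => decide (a.1 < b.1) || (!decide (b.1 < a.1) && decide (a.2 < b.2))) x acc) []
    = xs.foldl (fun acc x => PySem.List.insertBy
      (fun a b => decide ((toLex a : Lex (Int × Int)) < toLex b)) x acc) []
  have hfn : (fun (a b : Int × Int) =>
      decide (a.1 < b.1) || (!decide (b.1 < a.1) && decide (a.2 < b.2)))
      = fun a b => decide ((toLex a : Lex (Int × Int)) < toLex b) := by
    funext a b
    by_cases h1 : a.1 < b.1 <;> by_cases h2 : b.1 < a.1 <;> by_cases h3 : a.2 < b.2 <;>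
      simp [Prod.Lex.lt_iff, h1, h2, h3] <;> omega
  rw [hfn]

-- two lexicographically strictly increasing lists with the same elements are equal
theorem pvEq_of_pairwise_lt (xs ys : List (Int × Int))
    (hxs : xs.Pairwise (fun a b => (toLex a : Lex (Int × Int)) < toLex b))
    (hys : ys.Pairwise (fun a b => (toLex a : Lex (Int × Int)) < toLex b))
    (hperm : xs.Perm ys) : xs = ys := by
  have h1 : PySem.List.sorted xs (fun p => (toLex p : Lex (Int × Int))) = xs :=
    PySem.List.sorted_eq_of_perm_of_pairwise_lt xs xs _ (List.Perm.refl xs) hxs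
  have h2 : PySem.List.sorted ys (fun p => (toLex p : Lex (Int × Int))) = ys :=
    PySem.List.sorted_eq_of_perm_of_pairwise_lt ys ys _ (List.Perm.refl ys) hys
  have h3 := PySem.List.sorted_eq_sorted_of_perm xs ys
    (fun p => (toLex p : Lex (Int × Int))) (toLex.injective) hperm
  rw [h1, h2] at h3
  exact h3

theorem pvPairwise_pyRange (a b : Int) :
    List.Pairwise (· < ·) (PySem.List.pyRange a b) := by
  by_cases h : a < b
  · rw [PySem.List.pyRange_one_cons h]
    refine List.pairwise_cons.2 ⟨?_, pvPairwise_pyRange (a + 1) b⟩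
    intro x hx
    have := PySem.List.mem_pyRange_one.1 hx
    omega
  · have : PySem.List.pyRange a b = [] := by
      refine List.eq_nil_iff_forall_not_mem.2 (fun x hx => ?_)
      have := PySem.List.mem_pyRange_one.1 hx
      omega
    rw [this]
    exact List.Pairwise.nil
termination_by (b - a).toNat
decreasing_by omega

-- the grid list: lexicographically strictly increasing, members = the grid cells
theorem pvGrid_pairwise (eb fb : Int) :
    (((PySem.List.pyRange 0 eb).flatMap (fun e =>
        (PySem.List.pyRange 0 fb).map (fun f => (e, f))))).Pairwise
      (fun a b => (toLex a : Lex (Int × Int)) < toLex b) := by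
  rw [List.pairwise_flatMap]
  constructor
  · intro e _
    rw [List.pairwise_map]
    exact (pvPairwise_pyRange 0 fb).imp (fun h => by
      rw [Prod.Lex.lt_iff]; right; exact ⟨rfl, h⟩)
  · exact (pvPairwise_pyRange 0 eb).imp (fun h => by
      intro x hx y hy
      simp only [List.mem_map] at hx hy
      obtain ⟨fx, _, rfl⟩ := hx
      obtain ⟨fy, _, rfl⟩ := hy
      rw [Prod.Lex.lt_iff]; left; exact h)

theorem pvGrid_mem (eb fb : Int) (c : Int × Int) :
    c ∈ ((PySem.List.pyRange 0 eb).flatMap (fun e =>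
        (PySem.List.pyRange 0 fb).map (fun f => (e, f)))) ↔
      0 ≤ c.1 ∧ c.1 < eb ∧ 0 ≤ c.2 ∧ c.2 < fb := by
  simp only [List.mem_flatMap, List.mem_map]
  constructor
  · rintro ⟨e, he, f, hf, rfl⟩
    have h1 := PySem.List.mem_pyRange_one.1 he
    have h2 := PySem.List.mem_pyRange_one.1 hf
    exact ⟨h1.1, h1.2, h2.1, h2.2⟩
  · rintro ⟨h1, h2, h3, h4⟩
    exact ⟨c.1, PySem.List.mem_pyRange_one.2 ⟨h1, h2⟩,
           c.2, PySem.List.mem_pyRange_one.2 ⟨h3, h4⟩, rfl⟩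

-- the sorted union is lexicographically strictly increasing
theorem pvPoints_pairwise (uni : List (Int × Int)) (hnd : uni.Nodup) :
    (PySem.List.sorted uni (fun p => (toLex p : Lex (Int × Int)))).Pairwise
      (fun a b => (toLex a : Lex (Int × Int)) < toLex b) := by
  have hle := PySem.List.sorted_pairwise uni (fun p => (toLex p : Lex (Int × Int)))
  have hnd' : (PySem.List.sorted uni (fun p => (toLex p : Lex (Int × Int)))).Nodup :=
    (PySem.List.sorted_perm uni _ false).nodup_iff.2 hnd
  exact (hle.and hnd').imp (fun h =>
    lt_of_le_of_ne h.1 (fun he => h.2 (toLex.injective he)))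

-- the filtered grid list equals the filtered sorted union
theorem pvGrid_filter_eq (uni : List (Int × Int)) (hnd : uni.Nodup)
    (eb fb : Int) (bnd : Int × Int → Bool)
    (hbnd : ∀ c, bnd c = true ↔ 0 ≤ c.1 ∧ c.1 < eb ∧ 0 ≤ c.2 ∧ c.2 < fb) :
    (((PySem.List.pyRange 0 eb).flatMap (fun e =>
        (PySem.List.pyRange 0 fb).map (fun f => (e, f))))).filter
      (fun c => decide (c ∈ uni)) =
    (PySem.List.sorted uni (fun p => (toLex p : Lex (Int × Int)))).filter bnd := by
  apply pvEq_of_pairwise_lt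
  · exact (pvGrid_pairwise eb fb).filter _
  · exact (pvPoints_pairwise uni hnd).filter _
  · have hndG : (((PySem.List.pyRange 0 eb).flatMap (fun e =>
        (PySem.List.pyRange 0 fb).map (fun f => (e, f))))).Nodup :=
      (pvGrid_pairwise eb fb).imp (fun h he => absurd (he ▸ h) (lt_irrefl _)) |>.imp
        (fun h => h) -- Pairwise (· ≠ ·) = Nodup
    refine (List.perm_ext_iff_of_nodup (hndG.filter _)
      (((PySem.List.sorted_perm uni _ false).nodup_iff.2 hnd).filter _)).2 (fun c => ?_)
    simp only [List.mem_filter, pvGrid_mem, decide_eq_true_eq,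
      (PySem.List.sorted_perm uni (fun p => (toLex p : Lex (Int × Int))) false).mem_iff,
      hbnd]
    tauto

-- fold preservation of a state invariant
theorem pvFoldl_pres {α σ : Type} (inv : σ → Prop) (g : σ → α → σ)
    (h : ∀ s x, inv s → inv (g s x)) :
    ∀ (l : List α) (s : σ), inv s → inv (l.foldl g s) := by
  intro l
  induction l with
  | nil => exact fun s hs => hs
  | cons x xs ih => exact fun s hs => ih (g s x) (h s x hs)

-- pvAStep only ever adds members of the union
theorem pvAStep_inv (uni al : PySem.Set (Int × Int)) (q : Int × Int)
    (h : ∀ c ∈ al, c ∈ uni) : ∀ c ∈ pvAStep uni al q, c ∈ uni := by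
  unfold pvAStep
  split_ifs with hc
  · intro c hcm
    rcases (PySem.Set.mem_add _ _ _).1 hcm with h1 | h1
    · exact h c h1
    · exact h1 ▸ hc.2.2
  · exact h

def pvNb : List (Int × Int) :=
  [(-1, 0), (0, -1), (1, 0), (0, 1), (-1, -1), (-1, 1), (1, -1), (1, 1)]

-- the whole equivalence, on clean fold shapes (defeq to both ports' bodies)
set_option maxHeartbeats 1000000 in
theorem pvMain (uni al0 : PySem.Set (Int × Int)) (hndU : uni.Nodup)
    (hsub0 : ∀ c ∈ al0, c ∈ uni) (e_len f_len : Int) :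
    List.foldl (fun al ef => pvAStep uni al ef)
      (List.foldl
        (fun al ef =>
          if ef ∈ al then
            List.foldl (fun al EF => pvAStep uni al (ef.1 + EF.1, ef.2 + EF.2)) al pvNb
          else al)
        al0
        (List.flatMap (fun e => List.map (fun f => (e, f)) (PySem.List.pyRange 0 (f_len + 1)))
          (PySem.List.pyRange 0 (e_len + 1))))
      (List.flatMap (fun e => List.map (fun f => (e, f)) (PySem.List.pyRange 0 f_len))
        (PySem.List.pyRange 0 e_len)) =
    (List.foldl
        (fun st p =>
          if 0 ≤ p.1 ∧ p.1 < e_len ∧ 0 ≤ p.2 ∧ p.2 < f_len ∧ p.1 ∉ st.2.1 ∧ p.2 ∉ st.2.2 then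
            (PySem.Set.add st.1 p, PySem.Set.add st.2.1 p.1, PySem.Set.add st.2.2 p.2)
          else st)
        (List.foldl
          (fun st p =>
            if 0 ≤ p.1 ∧ p.1 ≤ e_len ∧ 0 ≤ p.2 ∧ p.2 ≤ f_len ∧ p ∈ st.1 then
              List.foldl (fun st EF => pvTryAdd uni st (p.1 + EF.1, p.2 + EF.2)) st pvNb
            else st)
          (al0, PySem.Set.ofList (List.map Prod.fst al0), PySem.Set.ofList (List.map Prod.snd al0))
          (PySem.List.sorted2 uni Prod.fst Prod.snd))
        (PySem.List.sorted2 uni Prod.fst Prod.snd)).1 := by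
  rw [pvSorted2_eq uni]
  set L := PySem.List.sorted uni (fun p => (toLex p : Lex (Int × Int))) with hL
  have hmemL : ∀ c, c ∈ L ↔ c ∈ uni := fun c =>
    (PySem.List.sorted_perm uni (fun p => (toLex p : Lex (Int × Int))) false).mem_iff
  -- B phase 1 projected to the alignment-set level
  have hB1 := pvFold_rel
      (fun st p =>
        if 0 ≤ p.1 ∧ p.1 ≤ e_len ∧ 0 ≤ p.2 ∧ p.2 ≤ f_len ∧ p ∈ st.1 then
          List.foldl (fun st EF => pvTryAdd uni st (p.1 + EF.1, p.2 + EF.2)) st pvNb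
        else st)
      (fun al p =>
        if 0 ≤ p.1 ∧ p.1 ≤ e_len ∧ 0 ≤ p.2 ∧ p.2 ≤ f_len ∧ p ∈ al then
          List.foldl (fun al EF => pvAStep uni al (p.1 + EF.1, p.2 + EF.2)) al pvNb
        else al)
      (fun st p hst => by
        by_cases hc : 0 ≤ p.1 ∧ p.1 ≤ e_len ∧ 0 ≤ p.2 ∧ p.2 ≤ f_len ∧ p ∈ st.1
        · simp only [if_pos hc]
          exact pvFold_rel _ _
            (fun st EF hst => pvTryAdd_rel uni st (p.1 + EF.1, p.2 + EF.2) hst) pvNb st hst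
        · simp only [if_neg hc]
          exact ⟨hst, by trivial⟩)
      L
      (al0, PySem.Set.ofList (List.map Prod.fst al0), PySem.Set.ofList (List.map Prod.snd al0))
      ⟨rfl, rfl⟩
  obtain ⟨hInv1, hProj1⟩ := hB1
  -- B phase 2 projected to the alignment-set level
  have hB2 := pvFold_rel
      (fun st p =>
        if 0 ≤ p.1 ∧ p.1 < e_len ∧ 0 ≤ p.2 ∧ p.2 < f_len ∧ p.1 ∉ st.2.1 ∧ p.2 ∉ st.2.2 then
          (PySem.Set.add st.1 p, PySem.Set.add st.2.1 p.1, PySem.Set.add st.2.2 p.2)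
        else st)
      (fun al p =>
        if 0 ≤ p.1 ∧ p.1 < e_len ∧ 0 ≤ p.2 ∧ p.2 < f_len ∧
           p.1 ∉ PySem.Set.ofList (List.map Prod.fst al) ∧
           p.2 ∉ PySem.Set.ofList (List.map Prod.snd al) then
          PySem.Set.add al p
        else al)
      (fun st p hst => by
        obtain ⟨h1, h2⟩ := hst
        by_cases hc : 0 ≤ p.1 ∧ p.1 < e_len ∧ 0 ≤ p.2 ∧ p.2 < f_len ∧
            p.1 ∉ st.2.1 ∧ p.2 ∉ st.2.2
        · have hc' : 0 ≤ p.1 ∧ p.1 < e_len ∧ 0 ≤ p.2 ∧ p.2 < f_len ∧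
              p.1 ∉ PySem.Set.ofList (List.map Prod.fst st.1) ∧
              p.2 ∉ PySem.Set.ofList (List.map Prod.snd st.1) := by
            rw [← h1, ← h2]; exact hc
          simp only [if_pos hc, if_pos hc']
          exact ⟨pvAdd_inv st p ⟨h1, h2⟩ hc.2.2.2.2.1, by trivial⟩
        · have hc' : ¬ (0 ≤ p.1 ∧ p.1 < e_len ∧ 0 ≤ p.2 ∧ p.2 < f_len ∧
              p.1 ∉ PySem.Set.ofList (List.map Prod.fst st.1) ∧
              p.2 ∉ PySem.Set.ofList (List.map Prod.snd st.1)) := by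
            rw [← h1, ← h2]; exact hc
          simp only [if_neg hc, if_neg hc']
          exact ⟨⟨h1, h2⟩, by trivial⟩)
      L _ hInv1
  obtain ⟨-, hProj2⟩ := hB2
  rw [hProj2, hProj1]
  -- A phase 1: restrict the grid sweep to the union's cells, then identify lists
  have hPhase1 :
      List.foldl
        (fun al ef =>
          if ef ∈ al then
            List.foldl (fun al EF => pvAStep uni al (ef.1 + EF.1, ef.2 + EF.2)) al pvNb
          else al)
        al0
        (List.flatMap (fun e => List.map (fun f => (e, f)) (PySem.List.pyRange 0 (f_len + 1)))
          (PySem.List.pyRange 0 (e_len + 1))) =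
      List.foldl
        (fun al p =>
          if 0 ≤ p.1 ∧ p.1 ≤ e_len ∧ 0 ≤ p.2 ∧ p.2 ≤ f_len ∧ p ∈ al then
            List.foldl (fun al EF => pvAStep uni al (p.1 + EF.1, p.2 + EF.2)) al pvNb
          else al)
        al0 L := by
    have h1 := pvFoldl_filter_of_inv (fun c => decide (c ∈ uni))
        (fun al => ∀ c ∈ al, c ∈ uni)
        (fun al ef =>
          if ef ∈ al then
            List.foldl (fun al EF => pvAStep uni al (ef.1 + EF.1, ef.2 + EF.2)) al pvNb
          else al)
        (fun al ef h => by
          by_cases hm : ef ∈ al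
          · simp only [if_pos hm]
            exact pvFoldl_pres _ _ (fun al EF h => pvAStep_inv uni al _ h) pvNb al h
          · simpa [if_neg hm] using h)
        (fun al ef h hf => by
          have : ef ∉ al := fun hm => (of_decide_eq_false hf) (h ef hm)
          simp only [if_neg this])
        (List.flatMap (fun e => List.map (fun f => (e, f)) (PySem.List.pyRange 0 (f_len + 1)))
          (PySem.List.pyRange 0 (e_len + 1)))
        al0 hsub0
    have h2 := pvGrid_filter_eq uni hndU (e_len + 1) (f_len + 1)
        (fun p => decide (0 ≤ p.1 ∧ p.1 ≤ e_len ∧ 0 ≤ p.2 ∧ p.2 ≤ f_len))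
        (by intro c; simp only [decide_eq_true_eq]; omega)
    rw [h1, h2, ← hL, List.foldl_filter]
    refine PySem.List.foldl_congr_mem _ _ _ _ (fun acc p _ => ?_)
    dsimp only
    by_cases hb : 0 ≤ p.1 ∧ p.1 ≤ e_len ∧ 0 ≤ p.2 ∧ p.2 ≤ f_len
    · by_cases hm : p ∈ acc
      · rw [if_pos (decide_eq_true hb), if_pos hm,
            if_pos ⟨hb.1, hb.2.1, hb.2.2.1, hb.2.2.2, hm⟩]
      · rw [if_pos (decide_eq_true hb), if_neg hm, if_neg (by tauto)]
    · rw [if_neg (fun h => hb (of_decide_eq_true h)), if_neg (by tauto)]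
  -- A phase 2: restrict the grid sweep to the union's cells, then identify lists
  have hPhase2 : ∀ al : PySem.Set (Int × Int),
      List.foldl (fun al ef => pvAStep uni al ef) al
        (List.flatMap (fun e => List.map (fun f => (e, f)) (PySem.List.pyRange 0 f_len))
          (PySem.List.pyRange 0 e_len)) =
      List.foldl
        (fun al p =>
          if 0 ≤ p.1 ∧ p.1 < e_len ∧ 0 ≤ p.2 ∧ p.2 < f_len ∧
             p.1 ∉ PySem.Set.ofList (List.map Prod.fst al) ∧
             p.2 ∉ PySem.Set.ofList (List.map Prod.snd al) then
            PySem.Set.add al p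
          else al)
        al L := by
    intro al
    have h1 := pvFoldl_filter_of_inv (fun c => decide (c ∈ uni))
        (fun _ => True)
        (fun al ef => pvAStep uni al ef)
        (fun _ _ _ => trivial)
        (fun al ef _ hf => by
          have hnc : ¬ (ef.1 ∉ PySem.Set.ofList (List.map Prod.fst al) ∧
              ef.2 ∉ PySem.Set.ofList (List.map Prod.snd al) ∧ ef ∈ uni) :=
            fun hcond => (of_decide_eq_false hf) hcond.2.2
          unfold pvAStep
          simp only [if_neg hnc])
        (List.flatMap (fun e => List.map (fun f => (e, f)) (PySem.List.pyRange 0 f_len))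
          (PySem.List.pyRange 0 e_len))
        al trivial
    have h2 := pvGrid_filter_eq uni hndU e_len f_len
        (fun p => decide (0 ≤ p.1 ∧ p.1 < e_len ∧ 0 ≤ p.2 ∧ p.2 < f_len))
        (by intro c; simp only [decide_eq_true_eq])
    rw [h1, h2, ← hL, List.foldl_filter]
    refine PySem.List.foldl_congr_mem _ _ _ _ (fun acc p hp => ?_)
    have hpu : p ∈ uni := (hmemL p).1 hp
    unfold pvAStep
    by_cases hb : 0 ≤ p.1 ∧ p.1 < e_len ∧ 0 ≤ p.2 ∧ p.2 < f_len
    · rw [if_pos (decide_eq_true hb)]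
      by_cases hrc : p.1 ∉ PySem.Set.ofList (List.map Prod.fst acc) ∧
          p.2 ∉ PySem.Set.ofList (List.map Prod.snd acc)
      · rw [if_pos ⟨hrc.1, hrc.2, hpu⟩,
            if_pos ⟨hb.1, hb.2.1, hb.2.2.1, hb.2.2.2, hrc.1, hrc.2⟩]
      · rw [if_neg (by tauto), if_neg (by tauto)]
    · rw [if_neg (fun h => hb (of_decide_eq_true h)), if_neg (by tauto)]
  rw [hPhase1, hPhase2]


-- ===== VERDICT (by name: the statement is the Claim_ definition above) =====
theorem grow_diag_final_spec : Claim_equal_grow_diag_final := by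
  intro e2f f2e _ _
  unfold Spec_grow_diag_final grow_diag_final grow_diag_final_alt
  cases hE : PySem.List.max?
      ((PySem.Set.union (PySem.Set.ofList e2f) (PySem.Set.ofList f2e)).map Prod.fst) (fun x => x) with
  | none => simp [hE]
  | some e_len =>
    cases hF : PySem.List.max?
        ((PySem.Set.union (PySem.Set.ofList e2f) (PySem.Set.ofList f2e)).map Prod.snd) (fun x => x) with
    | none => simp [hE, hF]
    | some f_len =>
      simp only [hE, hF]
      set uni := PySem.Set.union (PySem.Set.ofList e2f) (PySem.Set.ofList f2e) with huni
      set al0 := PySem.Set.inter (PySem.Set.ofList e2f) (PySem.Set.ofList f2e) with hal0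
      have hndU : uni.Nodup := PySem.Set.nodup_union _ _ (PySem.Set.nodup_ofList e2f)
      have hsub0 : ∀ c ∈ al0, c ∈ uni := by
        intro c hc
        rw [hal0, PySem.Set.mem_inter] at hc
        rw [huni, PySem.Set.mem_union]
        exact Or.inl hc.1
      exact pvMain uni al0 hndU hsub0 e_len f_len
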